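-- pv_equiv track=rewrite | github.com/BradlhyMachado/Examen-Final-Compiladores | generationCode copy.py | getEvaluationLog
-- ===== SOURCE A (Python) =====
-- def getEvaluationLog(expresiones):
--     logicos = ['igualdad', 'diferente', 'mayor_que', 'menor_que']
--     numeros = []
--     operaciones = []
--     evaluar = []
--     aux = 0
--
--     for i in range(len(expresiones)):
--         if str(expresiones[i][0]) == 'id':
--             numeros.append((expresiones[i][0], expresiones[i][1]))
--         if str(expresiones[i][0]) == 'numero':
--             numeros.append((expresiones[i][0], expresiones[i][1]))
--         if str(expresiones[i][0]) in logicos: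
--             operaciones.append((expresiones[i][0], expresiones[i][1]))
--
--     for num in numeros:
--         evaluar.append(num)
--         aux += 1
--         if aux >= 2:
--             while len(operaciones)>0:
--                 op = operaciones.pop(0)
--                 evaluar.append(op)
--                 break
--
--     del logicos, operaciones
--     return(evaluar)
-- ===== SOURCE B (Python) =====
-- def getEvaluationLog(expresiones):
--     logicos = ('igualdad', 'diferente', 'mayor_que', 'menor_que')
--     numeros = [(t, v) for t, v in expresiones if str(t) in ('id', 'numero')]
--     operaciones = [(t, v) for t, v in expresiones if str(t) in logicos]
--     if not numeros:
--         return []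
--     rest = numeros[1:]
--     evaluar = [numeros[0]]
--     for num, op in zip(rest, operaciones):
--         evaluar.append(num)
--         evaluar.append(op)
--     k = min(len(rest), len(operaciones))
--     evaluar.extend(rest[k:])
--     return evaluar
-- ===== Notes on version B (the rewrite author's own statement) =====
-- stated objective: simpler
-- what changed: Replaces A's aux counter with while/break operator-popping by two filter passes followed by a zip interleave of numbers with operators plus an explicit leftover tail.
import Mathlib
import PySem

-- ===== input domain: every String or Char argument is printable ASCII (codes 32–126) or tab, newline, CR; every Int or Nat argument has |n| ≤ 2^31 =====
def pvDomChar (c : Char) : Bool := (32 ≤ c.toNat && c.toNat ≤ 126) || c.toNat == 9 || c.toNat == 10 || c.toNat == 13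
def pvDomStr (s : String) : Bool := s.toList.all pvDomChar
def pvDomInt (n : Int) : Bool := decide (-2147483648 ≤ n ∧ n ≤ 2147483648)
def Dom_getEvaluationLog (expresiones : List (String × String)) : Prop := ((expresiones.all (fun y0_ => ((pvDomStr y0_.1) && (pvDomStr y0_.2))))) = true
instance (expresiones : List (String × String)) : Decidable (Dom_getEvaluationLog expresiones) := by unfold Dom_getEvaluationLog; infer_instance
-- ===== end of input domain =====

-- B replaces A's aux-counter/while-break interleaving loop with filters plus a zip-and-tail decomposition (objective: simpler).


-- ===== PORT A =====
-- first loop of A: classify each token into numeros / operaciones (three independent ifs, append at end)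
def pvClassA : List (String × String) → List (String × String) → List (String × String) →
    (List (String × String) × List (String × String))
  | [], ns, os => (ns, os)
  | e :: rest, ns, os =>
    let ns := if e.1 == "id" then ns ++ [(e.1, e.2)] else ns
    let ns := if e.1 == "numero" then ns ++ [(e.1, e.2)] else ns
    let os := if (["igualdad", "diferente", "mayor_que", "menor_que"] : List String).contains e.1
              then os ++ [(e.1, e.2)] else os
    pvClassA rest ns os

-- second loop of A: append each num, bump aux, and once aux ≥ 2 pop one operator (while/break) if any
def pvBuildA : List (String × String) → List (String × String) → Int → List (String × String) →
    List (String × String)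
  | [], ev, _, _ => ev
  | num :: rest, ev, aux, ops =>
    let ev := ev ++ [num]
    let aux := aux + 1
    if aux ≥ 2 then
      match ops with
      | [] => pvBuildA rest ev aux []
      | op :: os => pvBuildA rest (ev ++ [op]) aux os
    else pvBuildA rest ev aux ops

def getEvaluationLog (expresiones : List (String × String)) : List (String × String) :=
  match pvClassA expresiones [] [] with
  | (numeros, operaciones) => pvBuildA numeros [] 0 operaciones

-- ===== PORT B =====
def getEvaluationLog_alt (expresiones : List (String × String)) : List (String × String) :=
  let logicos : List String := ["igualdad", "diferente", "mayor_que", "menor_que"]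
  let numeros := expresiones.filter (fun e => e.1 == "id" || e.1 == "numero")
  let operaciones := expresiones.filter (fun e => logicos.contains e.1)
  match numeros with
  | [] => []
  | n0 :: rest =>
    let k := min rest.length operaciones.length
    n0 :: ((rest.zip operaciones).flatMap (fun p => [p.1, p.2]) ++ rest.drop k)

-- ===== PRECONDITION & SPEC =====
def Spec_getEvaluationLog (expresiones : List (String × String)) (out : List (String × String)) : Prop := out = getEvaluationLog_alt expresiones
instance (expresiones : List (String × String)) (out : List (String × String)) : Decidable (Spec_getEvaluationLog expresiones out) := by unfold Spec_getEvaluationLog; infer_instance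

-- ===== CLAIM (what is proved, stated in full; the proofs are below) =====
def Claim_equal_getEvaluationLog : Prop := ∀ (expresiones : List (String × String)), Dom_getEvaluationLog expresiones → Spec_getEvaluationLog expresiones (getEvaluationLog expresiones)

-- ===== LEMMAS AND PROOFS =====

theorem pvClassA_eq (es : List (String × String)) : ∀ ns os,
    pvClassA es ns os =
      (ns ++ es.filter (fun e => e.1 == "id" || e.1 == "numero"),
       os ++ es.filter (fun e => (["igualdad", "diferente", "mayor_que", "menor_que"] : List String).contains e.1)) := by
  induction es with
  | nil => simp [pvClassA]
  | cons e rest ih =>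
    intro ns os
    simp only [pvClassA, ih]
    obtain ⟨t, v⟩ := e
    by_cases h1 : t = "id" <;> by_cases h2 : t = "numero" <;>
      simp_all [List.filter_cons, List.contains_eq_mem] <;> split <;> simp_all

theorem pvBuildA_eq (ns : List (String × String)) : ∀ ops ev (aux : Int), 1 ≤ aux →
    pvBuildA ns ev aux ops =
      ev ++ (ns.zip ops).flatMap (fun p => [p.1, p.2]) ++ ns.drop ops.length := by
  induction ns with
  | nil => simp [pvBuildA]
  | cons num rest ih =>
    intro ops ev aux haux
    have h2 : (2 : Int) ≤ aux + 1 := by omega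
    cases ops with
    | nil =>
      simp only [pvBuildA, if_pos h2]
      rw [ih [] _ _ (by omega)]
      simp
    | cons op os =>
      simp only [pvBuildA, if_pos h2]
      rw [ih os _ _ (by omega)]
      simp

theorem drop_min_eq (l : List (String × String)) (n : ℕ) :
    l.drop (min l.length n) = l.drop n := by
  rcases le_total n l.length with h | h
  · simp [min_eq_right h]
  · rw [min_eq_left h, List.drop_of_length_le le_rfl, List.drop_of_length_le h]

-- ===== VERDICT (by name: the statement is the Claim_ definition above) =====
theorem getEvaluationLog_spec : Claim_equal_getEvaluationLog := by
  intro es _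
  unfold Spec_getEvaluationLog getEvaluationLog getEvaluationLog_alt
  rw [pvClassA_eq]
  simp only [List.nil_append]
  cases h : es.filter (fun e => e.1 == "id" || e.1 == "numero") with
  | nil => simp [pvBuildA]
  | cons n0 rest =>
    simp only [pvBuildA, if_neg (by omega : ¬ ((0:Int) + 1 ≥ 2))]
    rw [pvBuildA_eq _ _ _ _ (by omega), drop_min_eq]
    simp
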